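-- pv_equiv track=rewrite | github.com/UPOD-datascience/CardioNER.nl | src/cardioner/multilabel/loader.py | merge_splits_into_chunks_multilabel
-- ===== SOURCE A (Python) =====
-- from typing import Dict, List, Literal, Optional, Tuple, Union
--
-- def merge_splits_into_chunks_multilabel(
--     tokens: List[str],
--     token_tags: List[List[str]],
--     splits: List[List[str]],
--     max_chunk_size: int,
-- ) -> List[Tuple[List[str], List[List[str]]]]:
--     """
--     Merge the hierarchical splits back into chunks that fit within max_chunk_size,
--     while keeping token_tags aligned.
--
--     Returns a list of (chunk_tokens, chunk_tags) tuples.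
--     """
--     chunks = []
--     current_chunk_tokens = []
--     current_chunk_tags = []
--     current_token_idx = 0
--
--     for split in splits:
--         split_len = len(split)
--
--         # Check if adding this split would exceed the limit
--         if (
--             len(current_chunk_tokens) + split_len > max_chunk_size
--             and current_chunk_tokens
--         ):
--             # Save current chunk and start a new one
--             chunks.append((current_chunk_tokens, current_chunk_tags))
--             current_chunk_tokens = []
--             current_chunk_tags = []
--
--         # Add the split to current chunk
--         current_chunk_tokens.extend(split)
--         current_chunk_tags.extend(
--             token_tags[current_token_idx : current_token_idx + split_len]
--         )
--         current_token_idx += split_len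
--
--     # Don't forget the last chunk
--     if current_chunk_tokens:
--         chunks.append((current_chunk_tokens, current_chunk_tags))
--
--     return chunks
-- ===== SOURCE B (Python) =====
-- def merge_splits_into_chunks_multilabel(tokens, token_tags, splits, max_chunk_size):
--     # Chunk-at-a-time: repeatedly scan forward for the maximal run of splits
--     # forming one chunk (a nonempty chunk must fit in max_chunk_size; a fresh
--     # chunk always absorbs its first tokens), then materialise that chunk from
--     # one splits slice and one contiguous token_tags slice.
--     lens = [len(s) for s in splits]
--     n = len(splits)
--     chunks = []
--     i = 0
--     offset = 0
--     while i < n: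
--         j, size = i, 0
--         while j < n and (size == 0 or size + lens[j] <= max_chunk_size):
--             size += lens[j]
--             j += 1
--         if size > 0:
--             toks = [t for s in splits[i:j] for t in s]
--             chunks.append((toks, token_tags[offset:offset + size]))
--         i = j
--         offset += size
--     return chunks
-- ===== Notes on version B (the rewrite author's own statement) =====
-- stated objective: alternative
-- what changed: Replaces A's element-at-a-time accumulate-and-flush pass with a chunk-at-a-time nested-loop algorithm: an inner scan over precomputed split lengths finds each maximal chunk boundary first, and only then the chunk is materialised from one splits slice plus one contiguous token_tags slice; no running chunk accumulator or flush rule exists.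
import Mathlib
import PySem

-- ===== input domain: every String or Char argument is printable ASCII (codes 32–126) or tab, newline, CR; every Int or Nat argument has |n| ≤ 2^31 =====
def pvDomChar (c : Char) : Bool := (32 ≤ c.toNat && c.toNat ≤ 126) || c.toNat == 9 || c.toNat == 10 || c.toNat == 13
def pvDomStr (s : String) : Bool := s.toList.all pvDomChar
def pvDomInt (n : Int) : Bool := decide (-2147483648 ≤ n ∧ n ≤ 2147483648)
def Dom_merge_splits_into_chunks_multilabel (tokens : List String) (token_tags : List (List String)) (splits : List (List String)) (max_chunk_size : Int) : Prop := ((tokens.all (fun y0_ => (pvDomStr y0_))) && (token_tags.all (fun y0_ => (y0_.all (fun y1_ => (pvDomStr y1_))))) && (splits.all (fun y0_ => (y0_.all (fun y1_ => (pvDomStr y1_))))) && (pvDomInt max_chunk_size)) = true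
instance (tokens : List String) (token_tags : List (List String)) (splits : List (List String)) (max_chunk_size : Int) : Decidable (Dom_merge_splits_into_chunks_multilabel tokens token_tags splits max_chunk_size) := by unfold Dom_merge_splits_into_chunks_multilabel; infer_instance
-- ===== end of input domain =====

-- B replaces A's accumulate-and-flush pass by a chunk-at-a-time algorithm: an
-- inner scan over split lengths finds each maximal chunk boundary, then the
-- chunk is built from one splits slice and one token_tags slice; objective: alternative.

-- ===== PORT A =====
-- state: (chunks, current_chunk_tokens, current_chunk_tags, current_token_idx)
def mscA_step (token_tags : List (List String)) (max_chunk_size : Int)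
    (st : List (List String × List (List String)) × List String × List (List String) × Int)
    (split : List String) :
    List (List String × List (List String)) × List String × List (List String) × Int :=
  let (chunks, curTok, curTags, idx) := st
  let splitLen : Int := (split.length : Int)
  let (chunks, curTok, curTags) :=
    if ((curTok.length : Int) + splitLen > max_chunk_size) ∧ curTok ≠ [] then
      (chunks ++ [(curTok, curTags)], ([] : List String), ([] : List (List String)))
    else (chunks, curTok, curTags)
  (chunks, curTok ++ split,
   curTags ++ PySem.List.slice token_tags (some idx) (some (idx + splitLen)),
   idx + splitLen)

def merge_splits_into_chunks_multilabel (tokens : List String) (token_tags : List (List String)) (splits : List (List String)) (max_chunk_size : Int) : List (List String × List (List String)) :=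
  let (chunks, curTok, curTags, _) :=
    splits.foldl (mscA_step token_tags max_chunk_size) ([], [], [], 0)
  if curTok ≠ [] then chunks ++ [(curTok, curTags)] else chunks

-- ===== PORT B =====
-- inner while-loop of Source B: scan forward from the chunk start, returning how
-- many splits the chunk takes and the final size (given the running size)
def mscB_take (max_chunk_size : Int) : List (List String) → Int → Nat × Int
  | [], size => (0, size)
  | s :: rest, size =>
    if size = 0 ∨ size + (s.length : Int) ≤ max_chunk_size then
      let p := mscB_take max_chunk_size rest (size + (s.length : Int))
      (p.1 + 1, p.2)
    else (0, size)

-- needed by mscB_emit's termination: each chunk takes at least one split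
theorem mscB_take_fst_pos (m : Int) (s : List String) (rest : List (List String)) :
    1 ≤ (mscB_take m (s :: rest) 0).1 := by
  simp [mscB_take]

-- outer while-loop of Source B: emit one chunk, continue after it
def mscB_emit (token_tags : List (List String)) (max_chunk_size : Int) :
    List (List String) → Int → List (List String × List (List String))
  | [], _ => []
  | s :: rest, offset =>
    let p := mscB_take max_chunk_size (s :: rest) 0
    let out := mscB_emit token_tags max_chunk_size ((s :: rest).drop p.1) (offset + p.2)
    if 0 < p.2 then
      (((s :: rest).take p.1).flatten,
       PySem.List.slice token_tags (some offset) (some (offset + p.2))) :: out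
    else out
termination_by l _ => l.length
decreasing_by
  simp only [List.length_drop]
  have := mscB_take_fst_pos max_chunk_size s rest
  simp only [List.length_cons]
  omega

def merge_splits_into_chunks_multilabel_alt (tokens : List String) (token_tags : List (List String)) (splits : List (List String)) (max_chunk_size : Int) : List (List String × List (List String)) :=
  mscB_emit token_tags max_chunk_size splits 0

-- ===== PRECONDITION & SPEC =====
def Spec_merge_splits_into_chunks_multilabel (tokens : List String) (token_tags : List (List String)) (splits : List (List String)) (max_chunk_size : Int) (out : List (List String × List (List String))) : Prop := out = merge_splits_into_chunks_multilabel_alt tokens token_tags splits max_chunk_size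
instance (tokens : List String) (token_tags : List (List String)) (splits : List (List String)) (max_chunk_size : Int) (out : List (List String × List (List String))) : Decidable (Spec_merge_splits_into_chunks_multilabel tokens token_tags splits max_chunk_size out) := by unfold Spec_merge_splits_into_chunks_multilabel; infer_instance

-- ===== CLAIM =====
def Claim_equal_merge_splits_into_chunks_multilabel : Prop := ∀ (tokens : List String) (token_tags : List (List String)) (splits : List (List String)) (max_chunk_size : Int), Dom_merge_splits_into_chunks_multilabel tokens token_tags splits max_chunk_size → Spec_merge_splits_into_chunks_multilabel tokens token_tags splits max_chunk_size (merge_splits_into_chunks_multilabel tokens token_tags splits max_chunk_size)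

-- ===== LEMMAS AND PROOFS =====

-- contiguous slices concatenate
theorem msc_slice_append {α : Type} (xs : List α) (a b c : Int)
    (ha : 0 ≤ a) (hab : a ≤ b) (hbc : b ≤ c) :
    PySem.List.slice xs (some a) (some b) ++ PySem.List.slice xs (some b) (some c)
      = PySem.List.slice xs (some a) (some c) := by
  rw [PySem.List.slice_toNat xs ha (le_trans ha hab),
      PySem.List.slice_toNat xs (le_trans ha hab) (le_trans (le_trans ha hab) hbc),
      PySem.List.slice_toNat xs ha (le_trans (le_trans ha hab) hbc)]
  have h1 : b.toNat = a.toNat + (b.toNat - a.toNat) := by omega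
  have h2 : c.toNat - a.toNat = (b.toNat - a.toNat) + (c.toNat - b.toNat) := by omega
  rw [h2, List.take_add]
  congr 1
  rw [h1, ← List.drop_drop]
  have h3 : a.toNat + (b.toNat - a.toNat) - a.toNat = b.toNat - a.toNat := by omega
  rw [h3]

theorem msc_slice_empty {α : Type} (xs : List α) (a : Int) (ha : 0 ≤ a) :
    PySem.List.slice xs (some a) (some a) = [] := by
  rw [PySem.List.slice_toNat xs ha ha]; simp

-- A's fold over one chunk: it flushes nothing while mscB_take keeps taking,
-- and stops exactly where mscB_take stops
theorem mscN (token_tags : List (List String)) (m : Int) (ys : List (List String))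
    (acc : List (List String × List (List String))) (curTok : List String)
    (curTags : List (List String)) (idx : Int) (hidx : 0 ≤ idx) :
    (ys.foldl (mscA_step token_tags m) (acc, curTok, curTags, idx)
      = (ys.drop (mscB_take m ys (curTok.length : Int)).1).foldl (mscA_step token_tags m)
          (acc,
           curTok ++ ((ys.take (mscB_take m ys (curTok.length : Int)).1).flatten),
           curTags ++ PySem.List.slice token_tags (some idx)
             (some (idx + (((ys.take (mscB_take m ys (curTok.length : Int)).1).flatten).length : Int))),
           idx + (((ys.take (mscB_take m ys (curTok.length : Int)).1).flatten).length : Int)))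
    ∧ (mscB_take m ys (curTok.length : Int)).2
        = (curTok.length : Int) + (((ys.take (mscB_take m ys (curTok.length : Int)).1).flatten).length : Int)
    ∧ ∀ d rest', ys.drop (mscB_take m ys (curTok.length : Int)).1 = d :: rest' →
        ¬((mscB_take m ys (curTok.length : Int)).2 = 0
          ∨ (mscB_take m ys (curTok.length : Int)).2 + (d.length : Int) ≤ m) := by
  induction ys generalizing acc curTok curTags idx with
  | nil =>
    refine ⟨?_, by simp [mscB_take], ?_⟩
    · simp [mscB_take, msc_slice_empty token_tags idx hidx]
    · intro d rest' h; simp [mscB_take] at h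
  | cons s rest ih =>
    by_cases hc : (curTok.length : Int) = 0 ∨ (curTok.length : Int) + (s.length : Int) ≤ m
    · have htake : mscB_take m (s :: rest) (curTok.length : Int)
          = ((mscB_take m rest ((curTok.length : Int) + (s.length : Int))).1 + 1,
             (mscB_take m rest ((curTok.length : Int) + (s.length : Int))).2) := by
        simp only [mscB_take]; rw [if_pos hc]
      have hnoflush : ¬(((curTok.length : Int) + (s.length : Int) > m) ∧ curTok ≠ []) := by
        rcases hc with h0 | hle
        · rintro ⟨-, hne⟩
          exact hne (List.length_eq_zero_iff.mp (by exact_mod_cast h0))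
        · rintro ⟨hgt, -⟩; omega
      have hstep : mscA_step token_tags m (acc, curTok, curTags, idx) s
          = (acc, curTok ++ s,
             curTags ++ PySem.List.slice token_tags (some idx) (some (idx + (s.length : Int))),
             idx + (s.length : Int)) := by
        simp only [mscA_step]; rw [if_neg hnoflush]
      have hlen : ((curTok ++ s).length : Int) = (curTok.length : Int) + (s.length : Int) := by
        simp
      have ih' := ih acc (curTok ++ s)
        (curTags ++ PySem.List.slice token_tags (some idx) (some (idx + (s.length : Int))))
        (idx + (s.length : Int)) (by have := Int.ofNat_nonneg s.length; omega)
      rw [hlen] at ih'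
      obtain ⟨ih1, ih2, ih3⟩ := ih'
      set q := mscB_take m rest ((curTok.length : Int) + (s.length : Int)) with hq
      have htk : (s :: rest).take (q.1 + 1) = s :: rest.take q.1 := rfl
      have hfl : (((s :: rest).take (q.1 + 1)).flatten) = s ++ (rest.take q.1).flatten := by
        rw [htk]; simp
      have hfll : ((((s :: rest).take (q.1 + 1)).flatten).length : Int)
          = (s.length : Int) + (((rest.take q.1).flatten).length : Int) := by
        rw [hfl]; push_cast [List.length_append]; ring
      refine ⟨?_, ?_, ?_⟩
      · rw [List.foldl_cons, hstep, ih1, htake]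
        simp only
        rw [hfll]
        have hdr : (s :: rest).drop (q.1 + 1) = rest.drop q.1 := rfl
        rw [hdr, hfl]
        have hsl : (curTags ++ PySem.List.slice token_tags (some idx) (some (idx + (s.length : Int))))
              ++ PySem.List.slice token_tags (some (idx + (s.length : Int)))
                 (some (idx + (s.length : Int) + (((rest.take q.1).flatten).length : Int)))
            = curTags ++ PySem.List.slice token_tags (some idx)
                 (some (idx + ((s.length : Int) + (((rest.take q.1).flatten).length : Int)))) := by
          rw [List.append_assoc]
          congr 1
          rw [msc_slice_append token_tags idx (idx + (s.length : Int))
            (idx + (s.length : Int) + (((rest.take q.1).flatten).length : Int)) hidx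
            (by have := Int.ofNat_nonneg s.length; omega)
            (by have := Int.ofNat_nonneg ((rest.take q.1).flatten).length; omega)]
          congr 2
          ring
        rw [hsl, List.append_assoc]
        have : idx + (s.length : Int) + (((rest.take q.1).flatten).length : Int)
            = idx + ((s.length : Int) + (((rest.take q.1).flatten).length : Int)) := by ring
        rw [this]
      · rw [htake]; simp only
        rw [hfll, ih2]; ring
      · intro d rest' hdr
        rw [htake] at hdr ⊢
        simp only [List.drop_succ_cons] at hdr
        exact ih3 d rest' hdr
    · have htake : mscB_take m (s :: rest) (curTok.length : Int) = (0, (curTok.length : Int)) := by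
        simp only [mscB_take]; rw [if_neg hc]
      refine ⟨?_, ?_, ?_⟩
      · rw [htake]
        simp [msc_slice_empty token_tags idx hidx]
      · rw [htake]; simp
      · intro d rest' hdr
        rw [htake] at hdr ⊢
        simp only [List.drop_zero] at hdr
        obtain ⟨hd, -⟩ := List.cons.injEq .. ▸ hdr
        cases hdr
        simpa using hc

-- finalization of A's loop state
def mscFin (st : List (List String × List (List String)) × List String × List (List String) × Int) :
    List (List String × List (List String)) :=
  if st.2.1 ≠ [] then st.1 ++ [(st.2.1, st.2.2.1)] else st.1

-- main invariant: A's fold-and-finalize from a fresh chunk equals B's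
-- chunk-at-a-time emission
theorem mscG (token_tags : List (List String)) (m : Int) :
    ∀ (n : Nat) (splits : List (List String)) (acc : List (List String × List (List String)))
      (offset : Int), splits.length ≤ n → 0 ≤ offset →
      mscFin (splits.foldl (mscA_step token_tags m) (acc, [], [], offset))
        = acc ++ mscB_emit token_tags m splits offset := by
  intro n
  induction n with
  | zero =>
    intro splits acc offset hlen hoff
    have : splits = [] := List.length_eq_zero_iff.mp (Nat.le_zero.mp hlen)
    subst this
    simp [mscFin, mscB_emit]
  | succ n ih =>
    intro splits acc offset hlen hoff
    match splits with
    | [] => simp [mscFin, mscB_emit]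
    | s :: ss =>
      have hN := mscN token_tags m (s :: ss) acc [] [] offset hoff
      simp only [List.length_nil, Nat.cast_zero] at hN
      obtain ⟨hN1, hN2, hN3⟩ := hN
      set P := mscB_take m (s :: ss) (0 : Int) with hP
      set F := ((s :: ss).take P.1).flatten with hF
      have hN2' : P.2 = (F.length : Int) := by rw [hN2]; simp
      simp only [List.nil_append] at hN1
      cases hd : (s :: ss).drop P.1 with
      | nil =>
        rw [hN1, hd]
        simp only [List.foldl_nil]
        rw [mscB_emit]
        simp only [← hP, ← hF, hd]
        by_cases hFe : F = []
        · have : ¬ 0 < P.2 := by rw [hN2', hFe]; simp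
          rw [if_neg this]
          simp [mscFin, hFe, mscB_emit]
        · have hpos : 0 < P.2 := by
            rw [hN2']
            exact_mod_cast List.length_pos_iff.mpr hFe
          rw [if_pos hpos]
          rw [hN2']
          simp [mscFin, mscB_emit, hFe]
      | cons d rest' =>
        have h3 := hN3 d rest' hd
        have hne : P.2 ≠ 0 ∧ m < P.2 + (d.length : Int) := by
          constructor
          · intro h; exact h3 (Or.inl h)
          · by_contra h; exact h3 (Or.inr (by omega))
        have hFne : F ≠ [] := by
          intro h
          apply hne.1
          rw [hN2', h]; simp
        have hflush : mscA_step token_tags m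
            (acc, F, PySem.List.slice token_tags (some offset) (some (offset + (F.length : Int))),
             offset + (F.length : Int)) d
            = (acc ++ [(F, PySem.List.slice token_tags (some offset) (some (offset + (F.length : Int))))],
               d, ([] : List (List String))
                 ++ PySem.List.slice token_tags (some (offset + (F.length : Int)))
                    (some (offset + (F.length : Int) + (d.length : Int))),
               offset + (F.length : Int) + (d.length : Int)) := by
          simp only [mscA_step]
          rw [if_pos ⟨by rw [hN2'] at hne; exact hne.2, hFne⟩]
          simp
        have hfresh : mscA_step token_tags m (acc ++ [(F, PySem.List.slice token_tags (some offset) (some (offset + (F.length : Int))))], [], [], offset + (F.length : Int)) d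
            = (acc ++ [(F, PySem.List.slice token_tags (some offset) (some (offset + (F.length : Int))))],
               ([] : List String) ++ d, ([] : List (List String))
                 ++ PySem.List.slice token_tags (some (offset + (F.length : Int)))
                    (some (offset + (F.length : Int) + (d.length : Int))),
               offset + (F.length : Int) + (d.length : Int)) := by
          simp only [mscA_step]
          rw [if_neg (by rintro ⟨-, h⟩; exact h rfl)]
        rw [hN1, hd]
        rw [List.foldl_cons, hflush]
        have heq : (d::rest').foldl (mscA_step token_tags m)
            (acc ++ [(F, PySem.List.slice token_tags (some offset) (some (offset + (F.length : Int))))], [], [], offset + (F.length : Int))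
            = rest'.foldl (mscA_step token_tags m)
            (acc ++ [(F, PySem.List.slice token_tags (some offset) (some (offset + (F.length : Int))))],
               d, ([] : List (List String))
                 ++ PySem.List.slice token_tags (some (offset + (F.length : Int)))
                    (some (offset + (F.length : Int) + (d.length : Int))),
               offset + (F.length : Int) + (d.length : Int)) := by
          rw [List.foldl_cons, hfresh]
          simp
        have hlen' : ((s :: ss).drop P.1).length ≤ n := by
          have hp1 := mscB_take_fst_pos m s ss
          rw [← hP] at hp1
          simp only [List.length_drop, List.length_cons] at *
          omega
        have hIH := ih ((s :: ss).drop P.1)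
          (acc ++ [(F, PySem.List.slice token_tags (some offset) (some (offset + (F.length : Int))))])
          (offset + (F.length : Int)) hlen'
          (by have := Int.ofNat_nonneg F.length; omega)
        rw [hd, List.foldl_cons, hfresh] at hIH
        simp only [List.nil_append] at hIH ⊢
        rw [hIH]
        conv_rhs => rw [mscB_emit]
        rw [← hP, ← hF]
        rw [if_pos (by omega : 0 < P.2)]
        rw [hd, hN2']
        simp

-- ===== VERDICT =====
theorem merge_splits_into_chunks_multilabel_spec : Claim_equal_merge_splits_into_chunks_multilabel := by
  intro tokens token_tags splits max_chunk_size _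
  show _ = _
  unfold merge_splits_into_chunks_multilabel merge_splits_into_chunks_multilabel_alt
  have hG := mscG token_tags max_chunk_size splits.length splits [] 0 le_rfl le_rfl
  simp only [List.nil_append] at hG
  rw [← hG]
  rcases hq : splits.foldl (mscA_step token_tags max_chunk_size) ([], [], [], 0) with ⟨c, t, g, i⟩
  simp [mscFin]
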